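-- pv_equiv track=rewrite | github.com/RamuVenkatesan-infosrc/Report | backend/services/api_matcher.py | _normalize_endpoint
-- ===== SOURCE A (Python) =====
-- def _normalize_endpoint(endpoint: str) -> str:
--     """Normalize endpoint for comparison."""
--     # Remove leading/trailing slashes
--     endpoint = endpoint.strip('/')
--
--     # Convert to lowercase
--     endpoint = endpoint.lower()
--
--     # Replace common variations
--     replacements = {
--         'users': 'user',
--         'items': 'item',
--         'products': 'product',
--         'orders': 'order',
--         'customers': 'customer'
--     }
--
--     for old, new in replacements.items():
--         endpoint = endpoint.replace(old, new)
--
--     return endpoint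
-- ===== SOURCE B (Python) =====
-- def _normalize_endpoint(endpoint: str) -> str:
--     """Normalize endpoint for comparison (single left-to-right scan)."""
--     endpoint = endpoint.strip('/').lower()
--     replacements = {
--         'users': 'user',
--         'items': 'item',
--         'products': 'product',
--         'orders': 'order',
--         'customers': 'customer'
--     }
--     parts = []
--     i = 0
--     n = len(endpoint)
--     while i < n:
--         for old, new in replacements.items():
--             if endpoint.startswith(old, i):
--                 parts.append(new)
--                 i += len(old)
--                 break
--         else:
--             parts.append(endpoint[i])
--             i += 1
--     return ''.join(parts)
-- ===== Notes on version B (the rewrite author's own statement) =====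
-- stated objective: alternative
-- what changed: The five sequential str.replace passes over the whole string are replaced by a single left-to-right scan that, at each position, substitutes the first matching plural token from the mapping (valid because no pattern or replacement overlaps or re-creates another).
import Mathlib
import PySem

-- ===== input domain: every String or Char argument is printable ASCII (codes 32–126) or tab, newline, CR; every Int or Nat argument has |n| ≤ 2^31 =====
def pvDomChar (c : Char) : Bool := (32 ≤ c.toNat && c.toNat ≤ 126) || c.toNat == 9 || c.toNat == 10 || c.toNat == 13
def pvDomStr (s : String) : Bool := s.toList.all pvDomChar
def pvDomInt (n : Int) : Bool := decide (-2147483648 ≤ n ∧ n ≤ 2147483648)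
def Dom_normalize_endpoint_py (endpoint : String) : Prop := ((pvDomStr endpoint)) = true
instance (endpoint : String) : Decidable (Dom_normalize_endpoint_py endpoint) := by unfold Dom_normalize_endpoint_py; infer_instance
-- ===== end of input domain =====

-- B replaces A's five sequential str.replace passes by one left-to-right scan that substitutes
-- the first matching plural token at each position (objective: alternative — same result, one traversal).

-- ===== PORT A =====
def normalize_endpoint_py (endpoint : String) : String :=
  let e1 := PySem.Str.stripChars endpoint "/"
  let e2 := PySem.Str.lower e1
  let replacements : PySem.Dict String String := PySem.Dict.ofList
    [("users", "user"), ("items", "item"), ("products", "product"),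
     ("orders", "order"), ("customers", "customer")]
  replacements.items.foldl (fun e p => PySem.Str.replace e p.1 p.2) e2

-- ===== PORT B =====
-- B-side helper: the plural→singular mapping of Source B, as (old, new) character lists in dict order.
def pvPats : List (List Char × List Char) :=
  [("users".toList, "user".toList), ("items".toList, "item".toList),
   ("products".toList, "product".toList), ("orders".toList, "order".toList),
   ("customers".toList, "customer".toList)]

-- B-side helper: Source B's `while i < n` scan over the remaining suffix; the fuel mirrors `n - i`.
def pvScanGo (ps : List (List Char × List Char)) : Nat → List Char → List Char
  | _, [] => []
  | 0, l => l
  | fuel+1, c :: t =>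
    match ps.find? (fun p => p.1.isPrefixOf (c :: t)) with
    | some p => p.2 ++ pvScanGo ps fuel ((c :: t).drop p.1.length)
    | none => c :: pvScanGo ps fuel t

def normalize_endpoint_py_alt (endpoint : String) : String :=
  let e1 := PySem.Str.stripChars endpoint "/"
  let e2 := PySem.Str.lower e1
  String.ofList (pvScanGo pvPats e2.toList.length e2.toList)

-- ===== PRECONDITION & SPEC =====
def Spec_normalize_endpoint_py (endpoint : String) (out : String) : Prop := out = normalize_endpoint_py_alt endpoint
instance (endpoint : String) (out : String) : Decidable (Spec_normalize_endpoint_py endpoint out) := by unfold Spec_normalize_endpoint_py; infer_instance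

-- ===== CLAIM (what is proved, stated in full; the proofs are below) =====
def Claim_equal_normalize_endpoint_py : Prop := ∀ (endpoint : String), Dom_normalize_endpoint_py endpoint → Spec_normalize_endpoint_py endpoint (normalize_endpoint_py endpoint)

-- ===== LEMMAS AND PROOFS =====

theorem pv_go_acc (old new : List Char) :
    ∀ fuel l acc, PySem.Chars.replace.go old new fuel l acc
      = acc.reverse ++ PySem.Chars.replace.go old new fuel l [] := by
  intro fuel
  induction fuel with
  | zero => intro l acc; simp [PySem.Chars.replace.go]
  | succ f ih =>
    intro l acc
    cases l with
    | nil => simp [PySem.Chars.replace.go]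
    | cons c t =>
      simp only [PySem.Chars.replace.go]
      split
      · rw [ih _ (new.reverse ++ acc), ih _ (new.reverse ++ [])]
        simp
      · rw [ih _ (c :: acc), ih _ [c]]
        simp
theorem pv_go_fuel (old new : List Char) (hold : old ≠ []) :
    ∀ k l fuel n, l.length ≤ k → l.length ≤ fuel → l.length ≤ n →
      PySem.Chars.replace.go old new fuel l [] = PySem.Chars.replace.go old new n l [] := by
  intro k
  induction k with
  | zero =>
    intro l fuel n hk _ _
    have : l = [] := List.length_eq_zero_iff.mp (Nat.le_zero.mp hk)
    subst this
    cases fuel <;> cases n <;> simp [PySem.Chars.replace.go]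
  | succ k ih =>
    intro l fuel n hk hf hn
    cases l with
    | nil => cases fuel <;> cases n <;> simp [PySem.Chars.replace.go]
    | cons c t =>
      simp only [List.length_cons] at hk hf hn
      obtain ⟨f, rfl⟩ : ∃ f, fuel = f + 1 := ⟨fuel - 1, by omega⟩
      obtain ⟨m, rfl⟩ : ∃ m, n = m + 1 := ⟨n - 1, by omega⟩
      simp only [PySem.Chars.replace.go]
      split
      · have hlen : 1 ≤ old.length := by
          cases old with
          | nil => exact absurd rfl hold
          | cons _ _ => simp
        have hdl : ((c :: t).drop old.length).length ≤ t.length := by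
          simp [List.length_drop]; omega
        rw [pv_go_acc, pv_go_acc old new m]
        rw [ih ((c :: t).drop old.length) f m (by omega) (by omega) (by omega)]
      · rw [pv_go_acc, pv_go_acc old new m]
        rw [ih t f m (by omega) (by omega) (by omega)]


def pvR (old new l : List Char) : List Char := PySem.Chars.replace.go old new l.length l []

theorem pvR_nil (old new : List Char) : pvR old new [] = [] := rfl

theorem pv_replace_eq (old new l : List Char) (hold : old ≠ []) :
    PySem.Chars.replace l old new = pvR old new l := by
  simp [PySem.Chars.replace, pvR, hold]

theorem pvR_match (old new l : List Char) (hold : old ≠ []) (h : old <+: l) :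
    pvR old new l = new ++ pvR old new (l.drop old.length) := by
  cases l with
  | nil =>
    exact absurd (List.prefix_nil.mp h) hold
  | cons c t =>
    have hlen : 1 ≤ old.length := List.length_pos_of_ne_nil hold
    have hpre : old.isPrefixOf (c :: t) = true := List.isPrefixOf_iff_prefix.mpr h
    show PySem.Chars.replace.go old new (t.length + 1) (c :: t) [] = _
    simp only [PySem.Chars.replace.go, hpre, if_true]
    rw [pv_go_acc]
    rw [pv_go_fuel old new hold ((c :: t).drop old.length).length _ t.length
        ((c :: t).drop old.length).length (le_refl _) (by simp [List.length_drop]; omega) (le_refl _)]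
    simp [pvR]

theorem pvR_cons (old new : List Char) (c : Char) (t : List Char) (h : ¬ old <+: (c :: t)) :
    pvR old new (c :: t) = c :: pvR old new t := by
  have hpre : old.isPrefixOf (c :: t) = false := by
    rw [Bool.eq_false_iff]
    intro hc
    exact h (List.isPrefixOf_iff_prefix.mp hc)
  show PySem.Chars.replace.go old new (t.length + 1) (c :: t) [] = _
  simp only [PySem.Chars.replace.go, hpre]
  rw [pv_go_acc old new t.length t [c]]
  simp [pvR]

theorem pv_not_prefix_append {p u : List Char} (h1 : ¬ p <+: u) (h2 : ¬ u <+: p) (v : List Char) :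
    ¬ p <+: u ++ v := by
  intro h
  rcases Nat.lt_or_ge u.length p.length with hlt | hle
  · exact h2 (List.prefix_of_prefix_length_le (List.prefix_append u v) h (Nat.le_of_lt hlt))
  · exact h1 (List.prefix_of_prefix_length_le h (List.prefix_append u v) hle)

def pvBlocks (p u : List Char) : Prop :=
  ∀ j, j < u.length → ¬ p <+: u.drop j ∧ ¬ u.drop j <+: p

theorem pvBlocks_cons {p : List Char} {c : Char} {u : List Char}
    (h : pvBlocks p (c :: u)) : pvBlocks p u := by
  intro j hj
  have := h (j + 1) (by simpa using Nat.succ_lt_succ hj)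
  simpa using this

theorem pvR_pass (old new : List Char) {u : List Char} (h : pvBlocks old u) :
    ∀ v, pvR old new (u ++ v) = u ++ pvR old new v := by
  induction u with
  | nil => intro v; simp
  | cons c u' ih =>
    intro v
    have h0 := h 0 (by simp)
    simp only [List.drop_zero] at h0
    have hnp : ¬ old <+: (c :: u') ++ v := pv_not_prefix_append h0.1 h0.2 v
    rw [List.cons_append] at hnp ⊢
    rw [pvR_cons old new c (u' ++ v) hnp, ih (pvBlocks_cons h) v]
    simp

def pvM (ps : List (List Char × List Char)) (l : List Char) : List Char := pvScanGo ps l.length l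

theorem pvM_nil (ps : List (List Char × List Char)) : pvM ps [] = [] := rfl

theorem pv_scanGo_fuel (ps : List (List Char × List Char)) (hne : ∀ p ∈ ps, p.1 ≠ []) :
    ∀ k l fuel n, l.length ≤ k → l.length ≤ fuel → l.length ≤ n →
      pvScanGo ps fuel l = pvScanGo ps n l := by
  intro k
  induction k with
  | zero =>
    intro l fuel n hk _ _
    have : l = [] := List.length_eq_zero_iff.mp (Nat.le_zero.mp hk)
    subst this
    cases fuel <;> cases n <;> simp [pvScanGo]
  | succ k ih =>
    intro l fuel n hk hf hn
    cases l with
    | nil => cases fuel <;> cases n <;> simp [pvScanGo]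
    | cons c t =>
      simp only [List.length_cons] at hk hf hn
      obtain ⟨f, rfl⟩ : ∃ f, fuel = f + 1 := ⟨fuel - 1, by omega⟩
      obtain ⟨m, rfl⟩ : ∃ m, n = m + 1 := ⟨n - 1, by omega⟩
      simp only [pvScanGo]
      cases hfind : ps.find? (fun p => p.1.isPrefixOf (c :: t)) with
      | none =>
        simp only []
        rw [ih t f m (by omega) (by omega) (by omega)]
      | some q =>
        simp only []
        have hq : q ∈ ps := List.mem_of_find?_eq_some hfind
        have hq1 : q.1 ≠ [] := hne q hq
        have hlen : 1 ≤ q.1.length := List.length_pos_of_ne_nil hq1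
        rw [ih ((c :: t).drop q.1.length) f m (by simp [List.length_drop]; omega)
            (by simp [List.length_drop]; omega) (by simp [List.length_drop]; omega)]

theorem pvM_match (ps : List (List Char × List Char)) (hne : ∀ p ∈ ps, p.1 ≠ [])
    (c : Char) (t : List Char) (q : List Char × List Char)
    (h : ps.find? (fun p => p.1.isPrefixOf (c :: t)) = some q) :
    pvM ps (c :: t) = q.2 ++ pvM ps ((c :: t).drop q.1.length) := by
  have hq1 : q.1 ≠ [] := hne q (List.mem_of_find?_eq_some h)
  have hlen : 1 ≤ q.1.length := List.length_pos_of_ne_nil hq1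
  show pvScanGo ps (t.length + 1) (c :: t) = _
  simp only [pvScanGo, h]
  rw [pv_scanGo_fuel ps hne ((c :: t).drop q.1.length).length ((c :: t).drop q.1.length)
      t.length ((c :: t).drop q.1.length).length (le_refl _)
      (by simp [List.length_drop]; omega) (le_refl _)]
  rfl

theorem pvM_cons (ps : List (List Char × List Char)) (c : Char) (t : List Char)
    (h : ps.find? (fun p => p.1.isPrefixOf (c :: t)) = none) :
    pvM ps (c :: t) = c :: pvM ps t := by
  show pvScanGo ps (t.length + 1) (c :: t) = _
  simp only [pvScanGo, h]
  rfl

theorem pvM_pass (ps : List (List Char × List Char))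
    {u : List Char} (hb : ∀ p ∈ ps, pvBlocks p.1 u) :
    ∀ v, pvM ps (u ++ v) = u ++ pvM ps v := by
  induction u with
  | nil => intro v; simp
  | cons c u' ih =>
    intro v
    have hfind : ps.find? (fun p => p.1.isPrefixOf (c :: (u' ++ v))) = none := by
      rw [List.find?_eq_none]
      intro p hp
      have h0 := hb p hp 0 (by simp)
      simp only [List.drop_zero] at h0
      have := pv_not_prefix_append h0.1 h0.2 v
      rw [List.cons_append] at this
      simpa [List.isPrefixOf_iff_prefix] using this
    rw [List.cons_append, pvM_cons ps c (u' ++ v) hfind,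
        ih (fun p hp => pvBlocks_cons (hb p hp)) v]
    simp

theorem pvM_empty : ∀ l, pvM [] l = l := by
  intro l
  induction l with
  | nil => rfl
  | cons c t ih => rw [pvM_cons [] c t rfl, ih]

theorem pvNoCreate (ps : List (List Char × List Char)) (pk : List Char)
    (hne : ∀ p ∈ ps, p.1 ≠ [])
    (H : ∀ p ∈ ps, ∀ j, j < pk.length → 1 ≤ j → ¬ pk.drop j <+: p.2 ∧ ¬ p.2 <+: pk.drop j) :
    ∀ k t j, t.length ≤ k → 1 ≤ j → j < pk.length →
      ¬ pk.drop j <+: t → ¬ pk.drop j <+: pvM ps t := by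
  intro k
  induction k with
  | zero =>
    intro t j hk h1 hj hnp
    have : t = [] := List.length_eq_zero_iff.mp (Nat.le_zero.mp hk)
    subst this
    rw [pvM_nil]
    intro hp
    have : pk.drop j = [] := List.prefix_nil.mp hp
    have := congrArg List.length this
    simp [List.length_drop] at this
    omega
  | succ k ih =>
    intro t j hk h1 hj hnp
    cases t with
    | nil =>
      rw [pvM_nil]
      intro hp
      have : pk.drop j = [] := List.prefix_nil.mp hp
      have := congrArg List.length this
      simp [List.length_drop] at this
      omega
    | cons c t' =>
      simp only [List.length_cons] at hk
      cases hfind : ps.find? (fun p => p.1.isPrefixOf (c :: t')) with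
      | some q =>
        rw [pvM_match ps hne c t' q hfind]
        have hq : q ∈ ps := List.mem_of_find?_eq_some hfind
        have hH := H q hq j hj h1
        exact pv_not_prefix_append hH.1 hH.2 _
      | none =>
        rw [pvM_cons ps c t' hfind]
        have hdrop : pk.drop j = pk[j] :: pk.drop (j + 1) := List.drop_eq_getElem_cons hj
        rw [hdrop]
        intro hp
        rw [List.cons_prefix_cons] at hp
        obtain ⟨rfl, htail⟩ := hp
        rw [hdrop] at hnp
        by_cases hj1 : j + 1 < pk.length
        · have hnt : ¬ pk.drop (j + 1) <+: t' := by
            intro hq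
            exact hnp (List.cons_prefix_cons.mpr ⟨rfl, hq⟩)
          exact ih t' (j + 1) (by omega) (by omega) hj1 hnt htail
        · have : pk.drop (j + 1) = [] := by
            apply List.eq_nil_of_length_eq_zero
            simp [List.length_drop]; omega
          rw [this] at hnp
          exact hnp (List.cons_prefix_cons.mpr ⟨rfl, List.nil_prefix⟩)

theorem pvStep (ps : List (List Char × List Char)) (pk nk : List Char)
    (hpk : pk ≠ []) (hne : ∀ p ∈ ps, p.1 ≠ [])
    (hRpass : ∀ p ∈ ps, pvBlocks pk p.2)
    (hMpass : ∀ p ∈ ps, pvBlocks p.1 pk)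
    (hNC : ∀ p ∈ ps, ∀ j, j < pk.length → 1 ≤ j → ¬ pk.drop j <+: p.2 ∧ ¬ p.2 <+: pk.drop j) :
    ∀ k l, l.length ≤ k → pvR pk nk (pvM ps l) = pvM (ps ++ [(pk, nk)]) l := by
  have hneX : ∀ p ∈ ps ++ [(pk, nk)], p.1 ≠ [] := by
    intro p hp
    rcases List.mem_append.mp hp with h | h
    · exact hne p h
    · simp at h; subst h; exact hpk
  intro k
  induction k with
  | zero =>
    intro l hk
    have : l = [] := List.length_eq_zero_iff.mp (Nat.le_zero.mp hk)
    subst this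
    rw [pvM_nil, pvM_nil, pvR_nil]
  | succ k ih =>
    intro l hk
    cases l with
    | nil => rw [pvM_nil, pvM_nil, pvR_nil]
    | cons c t =>
      simp only [List.length_cons] at hk
      cases hfind : ps.find? (fun p => p.1.isPrefixOf (c :: t)) with
      | some q =>
        have hq : q ∈ ps := List.mem_of_find?_eq_some hfind
        have hq1 : q.1 ≠ [] := hne q hq
        have hlen : 1 ≤ q.1.length := List.length_pos_of_ne_nil hq1
        rw [pvM_match ps hne c t q hfind]
        rw [pvR_pass pk nk (hRpass q hq)]
        rw [ih ((c :: t).drop q.1.length) (by simp [List.length_drop]; omega)]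
        have hfindX : (ps ++ [(pk, nk)]).find? (fun p => p.1.isPrefixOf (c :: t)) = some q := by
          rw [List.find?_append, hfind]; rfl
        rw [pvM_match (ps ++ [(pk, nk)]) hneX c t q hfindX]
      | none =>
        by_cases hpre : pk <+: (c :: t)
        · obtain ⟨w, hw⟩ := hpre
          have hMp : pvM ps (c :: t) = pk ++ pvM ps w := by
            rw [← hw]
            exact pvM_pass ps hMpass w
          rw [hMp]
          rw [pvR_match pk nk (pk ++ pvM ps w) hpk (List.prefix_append pk _)]
          rw [List.drop_left]
          have hwlen : w.length ≤ k := by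
            have := congrArg List.length hw
            simp at this
            have hlen : 1 ≤ pk.length := List.length_pos_of_ne_nil hpk
            omega
          rw [ih w hwlen]
          have hfindX : (ps ++ [(pk, nk)]).find? (fun p => p.1.isPrefixOf (c :: t)) = some (pk, nk) := by
            rw [List.find?_append, hfind]
            simp [List.isPrefixOf_iff_prefix, ← hw]
          rw [pvM_match (ps ++ [(pk, nk)]) hneX c t (pk, nk) hfindX]
          simp only []
          rw [← hw, List.drop_left]
        · -- no pattern (old or new) matches at the head
          rw [pvM_cons ps c t hfind]
          have hnotpk : ¬ pk <+: c :: pvM ps t := by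
            cases hpk' : pk with
            | nil => exact absurd hpk' hpk
            | cons d pk' =>
              intro hp
              rw [List.cons_prefix_cons] at hp
              obtain ⟨rfl, htail⟩ := hp
              rw [hpk'] at hpre
              have hnt : ¬ pk' <+: t := fun hq => hpre (List.cons_prefix_cons.mpr ⟨rfl, hq⟩)
              by_cases h1 : 1 < pk.length
              · have : ¬ pk.drop 1 <+: pvM ps t := by
                  apply pvNoCreate ps pk hne hNC t.length t 1 (le_refl _) (le_refl _) h1
                  simpa [hpk'] using hnt
                rw [hpk'] at this
                simp at this
                exact this htail
              · have : pk' = [] := by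
                  have := congrArg List.length hpk'
                  simp at this
                  apply List.eq_nil_of_length_eq_zero
                  omega
                subst this
                exact hpre (List.cons_prefix_cons.mpr ⟨rfl, List.nil_prefix⟩)
          rw [pvR_cons pk nk c (pvM ps t) hnotpk]
          rw [ih t (by omega)]
          have hfindX : (ps ++ [(pk, nk)]).find? (fun p => p.1.isPrefixOf (c :: t)) = none := by
            rw [List.find?_append, hfind]
            simp [List.isPrefixOf_iff_prefix]
            exact hpre
          rw [pvM_cons (ps ++ [(pk, nk)]) c t hfindX]

def pvBlocksB (p u : List Char) : Bool :=
  (List.range u.length).all (fun j => !(p.isPrefixOf (u.drop j)) && !((u.drop j).isPrefixOf p))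

theorem pvBlocks_of_B {p u : List Char} (h : pvBlocksB p u = true) : pvBlocks p u := by
  intro j hj
  have := (List.all_eq_true.mp h) j (List.mem_range.mpr hj)
  simp only [Bool.and_eq_true, Bool.not_eq_true'] at this
  constructor
  · intro hp
    rw [(List.isPrefixOf_iff_prefix).mpr hp] at this
    exact absurd this.1 (by simp)
  · intro hp
    rw [(List.isPrefixOf_iff_prefix).mpr hp] at this
    exact absurd this.2 (by simp)

theorem pvCore (l : List Char) :
    pvR "customers".toList "customer".toList
      (pvR "orders".toList "order".toList
        (pvR "products".toList "product".toList
          (pvR "items".toList "item".toList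
            (pvR "users".toList "user".toList l)))) = pvM pvPats l := by
  have s1 : pvR "users".toList "user".toList l = pvM [("users".toList, "user".toList)] l := by
    have := pvStep [] "users".toList "user".toList (by decide) (by intro p hp; cases hp)
      (by intro p hp; cases hp) (by intro p hp; cases hp) (by intro p hp; cases hp) l.length l (le_refl _)
    rw [pvM_empty] at this
    simpa using this
  have s2 : pvR "items".toList "item".toList (pvM [("users".toList, "user".toList)] l)
      = pvM [("users".toList, "user".toList), ("items".toList, "item".toList)] l := by
    have := pvStep [("users".toList, "user".toList)] "items".toList "item".toList
      (by decide) (by decide)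
      (by intro p hp; simp only [List.mem_singleton] at hp; subst hp; exact pvBlocks_of_B (by decide))
      (by intro p hp; simp only [List.mem_singleton] at hp; subst hp; exact pvBlocks_of_B (by decide))
      (by decide) l.length l (le_refl _)
    simpa using this
  have s3 : pvR "products".toList "product".toList
      (pvM [("users".toList, "user".toList), ("items".toList, "item".toList)] l)
      = pvM [("users".toList, "user".toList), ("items".toList, "item".toList),
             ("products".toList, "product".toList)] l := by
    have := pvStep [("users".toList, "user".toList), ("items".toList, "item".toList)]
      "products".toList "product".toList (by decide) (by decide)
      (by intro p hp; fin_cases hp <;> exact pvBlocks_of_B (by decide))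
      (by intro p hp; fin_cases hp <;> exact pvBlocks_of_B (by decide))
      (by decide) l.length l (le_refl _)
    simpa using this
  have s4 : pvR "orders".toList "order".toList
      (pvM [("users".toList, "user".toList), ("items".toList, "item".toList),
            ("products".toList, "product".toList)] l)
      = pvM [("users".toList, "user".toList), ("items".toList, "item".toList),
             ("products".toList, "product".toList), ("orders".toList, "order".toList)] l := by
    have := pvStep [("users".toList, "user".toList), ("items".toList, "item".toList),
        ("products".toList, "product".toList)]
      "orders".toList "order".toList (by decide) (by decide)
      (by intro p hp; fin_cases hp <;> exact pvBlocks_of_B (by decide))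
      (by intro p hp; fin_cases hp <;> exact pvBlocks_of_B (by decide))
      (by decide) l.length l (le_refl _)
    simpa using this
  have s5 : pvR "customers".toList "customer".toList
      (pvM [("users".toList, "user".toList), ("items".toList, "item".toList),
            ("products".toList, "product".toList), ("orders".toList, "order".toList)] l)
      = pvM pvPats l := by
    have := pvStep [("users".toList, "user".toList), ("items".toList, "item".toList),
        ("products".toList, "product".toList), ("orders".toList, "order".toList)]
      "customers".toList "customer".toList (by decide) (by decide)
      (by intro p hp; fin_cases hp <;> exact pvBlocks_of_B (by decide))
      (by intro p hp; fin_cases hp <;> exact pvBlocks_of_B (by decide))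
      (by decide) l.length l (le_refl _)
    simpa [pvPats] using this
  rw [s1, s2, s3, s4, s5]

theorem pv_final (endpoint : String) :
    normalize_endpoint_py endpoint = normalize_endpoint_py_alt endpoint := by
  unfold normalize_endpoint_py normalize_endpoint_py_alt
  have hitems : (PySem.Dict.ofList
      [("users", "user"), ("items", "item"), ("products", "product"),
       ("orders", "order"), ("customers", "customer")] : PySem.Dict String String).items
      = [("users", "user"), ("items", "item"), ("products", "product"),
         ("orders", "order"), ("customers", "customer")] := by decide
  dsimp only
  rw [hitems]
  simp only [List.foldl]
  apply String.toList_inj.mp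
  simp only [PySem.Str.toList_replace, String.toList_ofList]
  have hch := pvCore (PySem.Str.lower (PySem.Str.stripChars endpoint "/")).toList
  rw [pv_replace_eq _ _ _ (by decide), pv_replace_eq _ _ _ (by decide),
      pv_replace_eq _ _ _ (by decide), pv_replace_eq _ _ _ (by decide),
      pv_replace_eq _ _ _ (by decide)]
  exact hch

-- ===== VERDICT (by name: the statement is the Claim_ definition above) =====
theorem normalize_endpoint_py_spec : Claim_equal_normalize_endpoint_py := by
  intro endpoint _
  unfold Spec_normalize_endpoint_py
  exact pv_final endpoint
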